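-- pv_equiv track=rewrite | github.com/emmadaae/IN2110 | logistisk_regresjon.py | _extract_unique_symbols
-- ===== SOURCE A (Python) =====
-- from collections import Counter
--
-- def _extract_unique_symbols(transcriptions, min_nb_occurrences=10):
--     """Gitt en rekke med IPA fonetiske transkripsjoner, ektraher en liste med alle IPA
--     symboler som finnes i transkripsjonene og forekommer minst min_nb_occurrences."""
--
--     liste = {}
--     for element in transcriptions:
--         for symbol in Counter(element):
--             if symbol not in liste:
--                 liste[symbol] = 1
--             else:
--                 sym = liste[symbol]
--                 sym += 1
--                 liste[symbol] = sym
--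
--     resultat = []
--     for symbol, forekomster in liste.items():
--         if forekomster >= min_nb_occurrences:
--             resultat.append(symbol)
--     return resultat
-- ===== SOURCE B (Python) =====
-- def _extract_unique_symbols(transcriptions, min_nb_occurrences=10):
--     """Same task, different shape: collect the distinct symbols once (first-encounter
--     order), then for each symbol count the transcriptions containing it by rescanning."""
--     symbols = list(dict.fromkeys(sym for t in transcriptions for sym in t))
--     return [s for s in symbols
--             if sum(s in t for t in transcriptions) >= min_nb_occurrences]
-- ===== Notes on version B (the rewrite author's own statement) =====
-- stated objective: simpler
-- what changed: Instead of incrementally building a symbol->count dict while scanning (a Counter per transcription, branch on key presence), B first collects the distinct symbols in first-encounter order via dict.fromkeys and then, per symbol, counts containing transcriptions by rescanning with a substring test.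
import Mathlib
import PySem

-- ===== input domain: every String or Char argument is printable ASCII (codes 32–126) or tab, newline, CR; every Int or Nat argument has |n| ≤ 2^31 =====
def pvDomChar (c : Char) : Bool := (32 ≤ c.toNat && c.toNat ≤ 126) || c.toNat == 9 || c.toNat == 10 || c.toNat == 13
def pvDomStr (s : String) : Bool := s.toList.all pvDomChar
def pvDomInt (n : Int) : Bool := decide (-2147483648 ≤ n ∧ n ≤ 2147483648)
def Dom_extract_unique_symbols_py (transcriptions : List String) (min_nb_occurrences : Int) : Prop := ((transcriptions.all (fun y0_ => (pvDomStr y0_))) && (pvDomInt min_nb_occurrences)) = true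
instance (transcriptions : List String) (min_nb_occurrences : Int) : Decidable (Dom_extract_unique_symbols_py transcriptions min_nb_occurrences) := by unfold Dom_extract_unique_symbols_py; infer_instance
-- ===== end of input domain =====

-- B collects the distinct symbols once and then counts containing transcriptions per symbol
-- (simpler decomposition); A builds a symbol->count dict incrementally. Equal output proved.

-- ===== PORT A =====
-- for element in transcriptions: for symbol in Counter(element): …  (Counter's keys =
-- distinct chars in first-occurrence order = PySem.List.dedup)
def extract_unique_symbols_py (transcriptions : List String) (min_nb_occurrences : Int) : List String :=
  ((transcriptions.foldl (fun d element =>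
      (PySem.List.dedup element.toList).foldl (fun d symbol =>
        if d.contains symbol = false then d.insert symbol 1
        else d.insert symbol (d.getD symbol 0 + 1)) d)
    (PySem.Dict.empty : PySem.Dict Char Int)).items).foldl (fun resultat p =>
    if p.2 ≥ min_nb_occurrences then resultat ++ [String.ofList [p.1]] else resultat) []

-- ===== PORT B =====
def extract_unique_symbols_py_alt (transcriptions : List String) (min_nb_occurrences : Int) : List String :=
  ((PySem.List.dedup (transcriptions.flatMap (fun t => t.toList))).filter (fun s =>
      decide ((transcriptions.map (fun t => if s ∈ t.toList then (1 : Int) else 0)).sum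
        ≥ min_nb_occurrences))).map (fun s => String.ofList [s])

-- ===== PRECONDITION & SPEC =====
def Spec_extract_unique_symbols_py (transcriptions : List String) (min_nb_occurrences : Int) (out : List String) : Prop := out = extract_unique_symbols_py_alt transcriptions min_nb_occurrences
instance (transcriptions : List String) (min_nb_occurrences : Int) (out : List String) : Decidable (Spec_extract_unique_symbols_py transcriptions min_nb_occurrences out) := by unfold Spec_extract_unique_symbols_py; infer_instance

-- ===== CLAIM (what is proved, stated in full; the proofs are below) =====
def Claim_equal_extract_unique_symbols_py : Prop := ∀ (transcriptions : List String) (min_nb_occurrences : Int), Dom_extract_unique_symbols_py transcriptions min_nb_occurrences → Spec_extract_unique_symbols_py transcriptions min_nb_occurrences (extract_unique_symbols_py transcriptions min_nb_occurrences)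

-- ===== LEMMAS AND PROOFS =====

-- A's inner-loop step is, in both branches, "insert symbol (old count + 1)".
theorem pv_innerStep_eq :
    (fun (d : PySem.Dict Char Int) (symbol : Char) =>
      if d.contains symbol = false then d.insert symbol 1
      else d.insert symbol (d.getD symbol 0 + 1))
    = fun d symbol => d.insert symbol (d.getD symbol 0 + 1) := by
  funext d symbol
  by_cases h : d.contains symbol = false
  · simp [h, PySem.Dict.getD_of_not_contains d 0 h]
  · simp [h]

-- counting in a dedup'd list is a 0/1 membership test
theorem pv_count_dedup (l : List Char) (c : Char) :
    ((PySem.List.dedup l).count c : Int) = (if c ∈ l then (1 : Int) else 0) := by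
  by_cases h : c ∈ l
  · rw [List.count_eq_one_of_mem (PySem.List.nodup_dedup l) ((PySem.List.mem_dedup l c).2 h)]
    simp [h]
  · rw [List.count_eq_zero_of_not_mem (fun hm => h ((PySem.List.mem_dedup l c).1 hm))]
    simp [h]

-- value invariant of A's outer loop: the stored count of c grows by one per
-- transcription containing c
theorem pv_build_getD (ts : List String) (d : PySem.Dict Char Int) (c : Char) :
    (ts.foldl (fun d element =>
        (PySem.List.dedup element.toList).foldl
          (fun d symbol => d.insert symbol (d.getD symbol 0 + 1)) d) d).getD c 0
    = d.getD c 0 + (ts.map (fun t => if c ∈ t.toList then (1 : Int) else 0)).sum := by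
  induction ts generalizing d with
  | nil => simp
  | cons t ts ih =>
    simp only [List.foldl_cons, List.map_cons, List.sum_cons, ih]
    rw [PySem.Dict.getD_foldl_insert_add_one, pv_count_dedup]
    ring

-- key-order invariant of A's outer loop: keys are updated by each transcription's chars
theorem pv_build_keys (ts : List String) (d : PySem.Dict Char Int) :
    (ts.foldl (fun d element =>
        (PySem.List.dedup element.toList).foldl
          (fun d symbol => d.insert symbol (d.getD symbol 0 + 1)) d) d).keys
    = PySem.Set.update d.keys (ts.flatMap (fun t => t.toList)) := by
  induction ts generalizing d with
  | nil => simp [PySem.Set.update_nil]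
  | cons t ts ih =>
    simp only [List.foldl_cons, List.flatMap_cons, ih,
      PySem.Dict.keys_foldl_insert, PySem.Set.update_append]
    congr 1
    -- updating with dedup xs adds the same elements as updating with xs
    rw [PySem.Set.update_eq_append_filter, PySem.Set.update_eq_append_filter,
      PySem.List.dedup_eq_ofList, PySem.Set.ofList_ofList]

theorem pv_build_nodup_keys (ts : List String) (d : PySem.Dict Char Int)
    (h : d.keys.Nodup) :
    (ts.foldl (fun d element =>
        (PySem.List.dedup element.toList).foldl
          (fun d symbol => d.insert symbol (d.getD symbol 0 + 1)) d) d).keys.Nodup := by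
  induction ts generalizing d with
  | nil => exact h
  | cons t ts ih =>
    exact ih _ (PySem.Dict.nodup_keys_foldl_insert _ _ _ h)

-- A's result loop ('if forekomster >= min: resultat.append(symbol)') is filter-then-map
-- (the library's foldl_append_if covers only a Bool test without the map)
theorem pv_foldl_append_ite (l : List (Char × Int)) (m : Int) (acc : List String) :
    l.foldl (fun resultat p =>
      if p.2 ≥ m then resultat ++ [String.ofList [p.1]] else resultat) acc
    = acc ++ (l.filter (fun p => decide (p.2 ≥ m))).map (fun p => String.ofList [p.1]) := by
  induction l generalizing acc with
  | nil => simp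
  | cons x l ih => by_cases h : x.2 ≥ m <;> simp [h, ih]

-- ===== VERDICT (by name: the statement is the Claim_ definition above) =====
theorem extract_unique_symbols_py_spec : Claim_equal_extract_unique_symbols_py := by
  intro ts m _
  show extract_unique_symbols_py ts m = extract_unique_symbols_py_alt ts m
  unfold extract_unique_symbols_py extract_unique_symbols_py_alt
  rw [pv_innerStep_eq] -- applies under the outer foldl via funext equality
  have hnd := pv_build_nodup_keys ts PySem.Dict.empty (by simp)
  have hkeys := pv_build_keys ts PySem.Dict.empty
  rw [PySem.Dict.items_eq_map_keys _ hnd 0, pv_foldl_append_ite, List.nil_append,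
    List.filter_map, List.map_map, hkeys]
  simp only [PySem.Dict.keys_empty, PySem.Set.update_nil_left, ← PySem.List.dedup_eq_ofList]
  congr 1
  apply List.filter_congr
  intro c _
  simp only [Function.comp, pv_build_getD, PySem.Dict.getD_empty, zero_add]
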